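-- pv_equiv track=rewrite | github.com/SEG-UNIBE/IntelliSorts | intellisorts_presortedness_metrics.py | inv_dis_comp
-- ===== SOURCE A (Python) =====
-- def inv_dis_comp(arr):
--     """
--     Number of comparisons needed for Inv/Dis computation
--     """
--     c_max_dist = 0
--     inv = 0
--     comparisons = 0
--
--     for key in range(len(arr)):
--         for j in range(key):
--             comparisons += 1
--             if arr[key] < arr[j]:
--                 c_max_dist = max(key-j,c_max_dist)
--                 inv += 1
--
--     return comparisons
-- ===== SOURCE B (Python) =====
-- def inv_dis_comp(arr):
--     n = len(arr)
--     return n * (n - 1) // 2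
-- ===== Notes on version B (the rewrite author's own statement) =====
-- stated objective: faster
-- what changed: Replaced the O(n^2) double loop that increments a counter once per pair with the closed form n*(n-1)//2, since the returned comparison count depends only on len(arr).
import Mathlib
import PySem

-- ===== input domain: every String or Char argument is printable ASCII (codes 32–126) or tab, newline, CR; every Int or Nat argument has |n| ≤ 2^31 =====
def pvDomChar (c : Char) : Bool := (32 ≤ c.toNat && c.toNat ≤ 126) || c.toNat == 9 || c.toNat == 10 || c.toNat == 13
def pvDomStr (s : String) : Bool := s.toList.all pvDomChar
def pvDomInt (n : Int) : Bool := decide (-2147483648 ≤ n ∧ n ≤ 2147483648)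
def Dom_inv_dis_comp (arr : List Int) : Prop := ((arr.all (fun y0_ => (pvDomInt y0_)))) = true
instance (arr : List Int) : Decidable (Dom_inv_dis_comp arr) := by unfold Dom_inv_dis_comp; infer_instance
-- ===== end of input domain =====

-- B replaces A's O(n^2) pair-counting double loop by the closed form n*(n-1)//2 (the count depends only on len(arr)).

-- ===== PORT A =====
-- state = (c_max_dist, inv, comparisons); arr[key]/arr[j] via pyGetD: indices produced
-- by range(key) / range(len(arr)) are always in range, so this is exact.
def inv_dis_comp (arr : List Int) : Int :=
  let st :=
    (PySem.List.pyRange 0 (arr.length : Int) 1).foldl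
      (fun (s : Int × Int × Int) key =>
        (PySem.List.pyRange 0 key 1).foldl
          (fun (t : Int × Int × Int) j =>
            let comparisons := t.2.2 + 1
            if PySem.List.pyGetD arr key 0 < PySem.List.pyGetD arr j 0 then
              (max (key - j) t.1, t.2.1 + 1, comparisons)
            else
              (t.1, t.2.1, comparisons))
          s)
      (0, 0, 0)
  st.2.2

-- ===== PORT B =====
def inv_dis_comp_alt (arr : List Int) : Int :=
  let n : Int := arr.length
  PySem.Int.floordiv (n * (n - 1)) 2

-- ===== PRECONDITION & SPEC =====
def Spec_inv_dis_comp (arr : List Int) (out : Int) : Prop := out = inv_dis_comp_alt arr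
instance (arr : List Int) (out : Int) : Decidable (Spec_inv_dis_comp arr out) := by unfold Spec_inv_dis_comp; infer_instance

-- ===== CLAIM (what is proved, stated in full; the proofs are below) =====
def Claim_equal_inv_dis_comp : Prop := ∀ (arr : List Int), Dom_inv_dis_comp arr → Spec_inv_dis_comp arr (inv_dis_comp arr)

-- ===== LEMMAS AND PROOFS =====

-- the inner loop adds 1 to the third component once per element, regardless of the branch
theorem pv_inner_third (arr : List Int) (key : Int) :
    ∀ (L : List Int) (s : Int × Int × Int),
      (L.foldl
        (fun (t : Int × Int × Int) j =>
          let comparisons := t.2.2 + 1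
          if PySem.List.pyGetD arr key 0 < PySem.List.pyGetD arr j 0 then
            (max (key - j) t.1, t.2.1 + 1, comparisons)
          else
            (t.1, t.2.1, comparisons))
        s).2.2 = s.2.2 + L.length := by
  intro L
  induction L with
  | nil => intro s; simp
  | cons x xs ih =>
      intro s
      simp only [List.foldl_cons, List.length_cons]
      rw [ih]
      split <;> simp <;> omega

-- the outer loop's third component is the triangular number
theorem pv_outer_third (arr : List Int) :
    ∀ (n : Nat) (s : Int × Int × Int),
      ((PySem.List.pyRange 0 (n : Int) 1).foldl
        (fun (s : Int × Int × Int) key =>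
          (PySem.List.pyRange 0 key 1).foldl
            (fun (t : Int × Int × Int) j =>
              let comparisons := t.2.2 + 1
              if PySem.List.pyGetD arr key 0 < PySem.List.pyGetD arr j 0 then
                (max (key - j) t.1, t.2.1 + 1, comparisons)
              else
                (t.1, t.2.1, comparisons))
            s)
        s).2.2 = s.2.2 + ((n * (n - 1) / 2 : Nat) : Int) := by
  intro n
  induction n with
  | zero => intro s; simp
  | succ m ih =>
      intro s
      have h : PySem.List.pyRange 0 ((m + 1 : Nat) : Int) 1
          = PySem.List.pyRange 0 (m : Int) 1 ++ [(m : Int)] := by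
        have := PySem.List.pyRange_one_succ_right (a := 0) (b := (m : Int)) (by positivity)
        push_cast
        exact this
      rw [h, List.foldl_append]
      simp only [List.foldl_cons, List.foldl_nil]
      rw [pv_inner_third, ih, PySem.List.length_pyRange_one]
      have hlen : (((m : Int) - 0).toNat : Int) = (m : Int) := by omega
      have harith : (m * (m - 1) / 2 : Nat) + m = ((m + 1) * (m + 1 - 1) / 2 : Nat) := by
        rcases m with _ | k
        · simp
        · simp only [Nat.add_sub_cancel]
          obtain ⟨t, ht⟩ : Even ((k + 1) * k) := by
            rw [Nat.mul_comm]; exact Nat.even_mul_succ_self k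
          have h2 : (k + 1 + 1) * (k + 1) = (k + 1) * k + 2 * (k + 1) := by ring
          omega
      rw [harith.symm]
      push_cast
      omega

theorem inv_dis_comp_eq (arr : List Int) : inv_dis_comp arr = inv_dis_comp_alt arr := by
  unfold inv_dis_comp inv_dis_comp_alt
  simp only []
  rw [pv_outer_third arr arr.length (0, 0, 0)]
  rcases hn : arr.length with _ | m
  · simp [PySem.Int.floordiv]
  · have : ((m + 1 : Nat) : Int) * (((m + 1 : Nat) : Int) - 1) = (((m + 1) * m : Nat) : Int) := by
      push_cast; ring
    rw [this, show ((2:Int)) = ((2:Nat):Int) from rfl, PySem.Int.floordiv_natCast]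
    norm_num

-- ===== VERDICT (by name: the statement is the Claim_ definition above) =====
theorem inv_dis_comp_spec : Claim_equal_inv_dis_comp := by
  intro arr _
  exact inv_dis_comp_eq arr
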